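-- pv_equiv track=rewrite | github.com/Marvinxtuc/polymarket-quant-trading-system | src/polymarket_bot/web.py | _query_values
-- ===== SOURCE A (Python) =====
-- def _query_values(query: dict[str, list[str]], key: str) -> list[str]:
--     values: list[str] = []
--     for raw in list(query.get(key, []) or []):
--         for part in str(raw or "").split(","):
--             text = part.strip()
--             if text:
--                 values.append(text)
--     return values
-- ===== SOURCE B (Python) =====
-- def _query_values(query: dict[str, list[str]], key: str) -> list[str]:
--     # Character-level streaming tokenizer: one pass over each value's characters,
--     # building tokens directly (no split/strip). `buf` holds the current token,
--     # `pending` holds interior whitespace not yet known to be trailing.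
--     values: list[str] = []
--     for raw in (query.get(key) or []):
--         buf: list[str] = []
--         pending: list[str] = []
--         for ch in raw:
--             if ch == ",":
--                 if buf:
--                     values.append("".join(buf))
--                 buf = []
--                 pending = []
--             elif ch in " \t\r\n":
--                 if buf:
--                     pending.append(ch)
--             else:
--                 buf.extend(pending)
--                 pending = []
--                 buf.append(ch)
--         if buf:
--             values.append("".join(buf))
--     return values
-- ===== Notes on version B (the rewrite author's own statement) =====
-- stated objective: alternative
-- what changed: Replaces split-on-comma + strip + filter with a character-level streaming tokenizer: one scan per value with a token buffer and a pending-whitespace list, emitting tokens directly at commas/end, never calling split or strip.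
import Mathlib
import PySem

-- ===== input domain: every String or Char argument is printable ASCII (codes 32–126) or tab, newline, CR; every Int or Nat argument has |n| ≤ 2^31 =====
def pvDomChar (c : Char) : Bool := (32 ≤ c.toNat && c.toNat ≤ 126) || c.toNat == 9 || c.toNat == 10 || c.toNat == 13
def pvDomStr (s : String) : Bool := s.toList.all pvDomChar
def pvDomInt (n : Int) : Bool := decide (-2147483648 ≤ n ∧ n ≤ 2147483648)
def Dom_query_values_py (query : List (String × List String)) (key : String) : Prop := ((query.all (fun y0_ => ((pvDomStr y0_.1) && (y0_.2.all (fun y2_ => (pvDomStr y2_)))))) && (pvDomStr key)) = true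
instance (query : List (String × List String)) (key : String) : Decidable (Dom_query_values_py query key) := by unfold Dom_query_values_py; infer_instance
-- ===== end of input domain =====

-- B replaces split-on-comma + strip + filter by a character-level streaming tokenizer
-- (token buffer + pending-whitespace list, tokens emitted at commas/end); objective: alternative.

-- ===== PORT A =====
def query_values_py (query : List (String × List String)) (key : String) : List String :=
  -- values: list[str] = []; for raw in list(query.get(key, []) or []): …
  let vals0 := (PySem.Dict.mk query).getD key []
  let vals1 := if vals0 = [] then [] else vals0          -- `… or []`
  vals1.foldl (fun values raw =>
    -- str(raw or "") : raw is a str, so this is `if raw == "" then "" else raw`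
    let s := if raw = "" then "" else raw
    ((PySem.Str.split? s ",").getD []).foldl (fun values part =>
      let text := PySem.Str.strip part
      if text ≠ "" then values ++ [text] else values) values) []

-- ===== PORT B =====
-- state = (values, buf, pending); one step of B's inner character loop
def pvScanStep (st : List String × List Char × List Char) (c : Char) :
    List String × List Char × List Char :=
  let values := st.1
  let buf := st.2.1
  let pending := st.2.2
  if c = ',' then
    ((if buf ≠ [] then values ++ [String.ofList buf] else values), [], [])
  else if c = ' ' ∨ c = '\t' ∨ c = '\r' ∨ c = '\n' then
    (values, buf, if buf ≠ [] then pending ++ [c] else pending)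
  else
    (values, buf ++ pending ++ [c], [])

def query_values_py_alt (query : List (String × List String)) (key : String) : List String :=
  -- for raw in (query.get(key) or []):
  let got := ((PySem.Dict.mk query).get? key).getD []
  (if got = [] then [] else got).foldl (fun values raw =>
    let st := raw.toList.foldl pvScanStep (values, [], [])
    -- if buf: values.append("".join(buf))
    if st.2.1 ≠ [] then st.1 ++ [String.ofList st.2.1] else st.1) []

-- ===== PRECONDITION & SPEC =====
def Spec_query_values_py (query : List (String × List String)) (key : String) (out : List String) : Prop := out = query_values_py_alt query key
instance (query : List (String × List String)) (key : String) (out : List String) : Decidable (Spec_query_values_py query key out) := by unfold Spec_query_values_py; infer_instance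

-- ===== CLAIM (what is proved, stated in full; the proofs are below) =====
def Claim_equal_query_values_py : Prop := ∀ (query : List (String × List String)) (key : String), Dom_query_values_py query key → Spec_query_values_py query key (query_values_py query key)

-- ===== LEMMAS AND PROOFS =====

-- PySem's fuel-based splitter on a one-character separator is Mathlib's List.splitOn.
theorem pv_go_spec (c : Char) (fuel : Nat) (l cur : List Char) (acc : List (List Char))
    (h : l.length < fuel) :
    PySem.Chars.splitOn.go [c] fuel l cur acc
      = acc.reverse ++ List.modifyHead (cur.reverse ++ ·) (List.splitOnP (· == c) l) := by
  induction fuel generalizing l cur acc with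
  | zero => omega
  | succ fuel ih =>
    cases l with
    | nil =>
      rw [PySem.Chars.splitOn.go.eq_def]
      cases fuel <;> simp [List.splitOnP_nil]
    | cons ch rest =>
      rw [PySem.Chars.splitOn.go.eq_def]
      simp only []
      by_cases hc : c = ch
      · subst hc
        have hp : List.isPrefixOf [c] (c :: rest) = true := by
          simp [List.isPrefixOf]
        rw [if_pos hp]
        rw [show List.drop [c].length (c :: rest) = rest from rfl]
        have hr : rest.length < fuel := by simpa using Nat.lt_of_succ_lt_succ h
        rw [ih _ _ _ hr]
        simp only [List.splitOnP_cons, beq_self_eq_true, if_pos]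
        cases List.splitOnP (fun x => x == c) rest <;> simp [List.modifyHead]
      · have hp : List.isPrefixOf [c] (ch :: rest) = false := by
          simp [List.isPrefixOf, hc]
        rw [if_neg (by simp [hp])]
        have hr : rest.length < fuel := by simpa using Nat.lt_of_succ_lt_succ h
        rw [ih _ _ _ hr]
        have hne : List.splitOnP (· == c) rest ≠ [] := List.splitOnP_ne_nil _ _
        rw [List.splitOnP_cons]
        have hch : (ch == c) = false := by simp; exact fun e => hc e.symm
        rw [hch]
        simp only [if_neg (by simp : ¬ (false = true))]
        obtain ⟨hd, tl, he⟩ := List.exists_cons_of_ne_nil hne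
        simp [he, List.modifyHead]

theorem pv_splitOn_eq (c : Char) (s : List Char) :
    PySem.Chars.splitOn s [c] = List.splitOn c s := by
  rw [PySem.Chars.splitOn, pv_go_spec c (s.length + 1) s [] [] (by omega)]
  have : List.splitOnP (· == c) s ≠ [] := List.splitOnP_ne_nil _ _
  obtain ⟨hd, tl, he⟩ := List.exists_cons_of_ne_nil this
  simp [List.splitOn, he, List.modifyHead]

-- the pieces one raw value contributes after strip/filter
def pvF (parts : List (List Char)) : List String :=
  ((parts.map String.ofList).map PySem.Str.strip).filter (fun t => t ≠ "")

def pvContrib (raw : String) : List String :=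
  pvF (List.splitOn ',' raw.toList)

-- A's inner loop appends the stripped non-empty pieces
theorem pv_inner (parts : List String) (acc : List String) :
    parts.foldl (fun values part =>
        let text := PySem.Str.strip part
        if text ≠ "" then values ++ [text] else values) acc
      = acc ++ (parts.map PySem.Str.strip).filter (fun t => t ≠ "") := by
  induction parts generalizing acc with
  | nil => simp
  | cons p ps ih =>
    rw [List.foldl_cons, ih]
    by_cases hp : PySem.Str.strip p = ""
    · simp [hp]
    · simp [hp]

theorem pv_split_str (s : String) :
    (PySem.Str.split? s ",").getD [] = (List.splitOn ',' s.toList).map String.ofList := by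
  rw [PySem.Str.split?]
  have h : PySem.Chars.split? s.toList ",".toList
      = some (List.splitOn ',' s.toList) := by
    rw [PySem.Chars.split?]
    rw [if_neg (by decide)]
    rw [show (",".toList) = [','] from rfl, pv_splitOn_eq]
  rw [h]
  rfl

-- A's whole loop, as a flatMap of contributions
theorem pv_A_eq_flatMap (vals : List String) (acc : List String) :
    vals.foldl (fun values raw =>
      let s := if raw = "" then "" else raw
      ((PySem.Str.split? s ",").getD []).foldl (fun values part =>
        let text := PySem.Str.strip part
        if text ≠ "" then values ++ [text] else values) values) acc
      = acc ++ vals.flatMap pvContrib := by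
  induction vals generalizing acc with
  | nil => simp
  | cons v vs ih =>
    rw [List.foldl_cons, ih]
    have hs : (if v = "" then "" else v) = v := by split_ifs with h; exact h.symm; rfl
    dsimp only
    rw [hs, pv_split_str, pv_inner]
    simp [pvContrib, pvF, List.append_assoc]

-- ---------- character facts ----------

theorem pv_ws_isspace (c : Char) (h : c = ' ' ∨ c = '\t' ∨ c = '\r' ∨ c = '\n') :
    PySem.Chars.isspace c = true := by
  rcases h with h | h | h | h <;> subst h <;> decide

theorem pv_not_ws_isspace (c : Char) (hd : pvDomChar c = true)
    (h : ¬(c = ' ' ∨ c = '\t' ∨ c = '\r' ∨ c = '\n')) :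
    PySem.Chars.isspace c = false := by
  by_contra hc
  have hc' : PySem.Chars.isspace c = true := by
    revert hc; cases PySem.Chars.isspace c <;> simp
  simp only [PySem.Chars.isspace, Bool.or_eq_true, Bool.and_eq_true, decide_eq_true_eq] at hc'
  simp only [pvDomChar, Bool.or_eq_true, Bool.and_eq_true, decide_eq_true_eq, beq_iff_eq] at hd
  have hn : c.toNat = 32 ∨ c.toNat = 9 ∨ c.toNat = 10 ∨ c.toNat = 13 := by omega
  apply h
  have hofn := Char.ofNat_toNat c
  rcases hn with hn | hn | hn | hn <;> rw [hn] at hofn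
  · exact Or.inl hofn.symm
  · exact Or.inr (Or.inl hofn.symm)
  · exact Or.inr (Or.inr (Or.inr hofn.symm))
  · exact Or.inr (Or.inr (Or.inl hofn.symm))

-- ---------- strip / rstrip facts ----------

theorem pv_dropWhile_append (p : Char → Bool) (c : Char) (hc : p c = false)
    (a b : List Char) :
    List.dropWhile p (a ++ c :: b) = List.dropWhile p a ++ c :: b := by
  induction a with
  | nil => simp [List.dropWhile_cons, hc]
  | cons y ys ih =>
    by_cases hy : p y = true
    · simp [List.dropWhile_cons, hy, ih]
    · simp [List.dropWhile_cons, hy]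

theorem pv_rstrip_append_cons (c : Char) (hc : PySem.Chars.isspace c = false)
    (x t : List Char) :
    PySem.Chars.rstrip (x ++ c :: t) = x ++ c :: PySem.Chars.rstrip t := by
  unfold PySem.Chars.rstrip
  rw [show (x ++ c :: t).reverse = t.reverse ++ c :: x.reverse by simp]
  rw [pv_dropWhile_append _ _ hc]
  simp

theorem pv_rstrip_ws (p : List Char) (h : ∀ c ∈ p, PySem.Chars.isspace c = true) :
    PySem.Chars.rstrip p = [] := by
  unfold PySem.Chars.rstrip
  have : List.dropWhile PySem.Chars.isspace p.reverse = [] := by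
    rw [List.dropWhile_eq_nil_iff]
    intro x hx
    exact h x (List.mem_reverse.mp hx)
  rw [this]; rfl

theorem pv_strip_cons_ws (c : Char) (hc : PySem.Chars.isspace c = true) (h : List Char) :
    PySem.Chars.strip (c :: h) = PySem.Chars.strip h := by
  unfold PySem.Chars.strip PySem.Chars.lstrip
  rw [List.dropWhile_cons, if_pos hc]

theorem pv_strip_cons_not_ws (c : Char) (hc : PySem.Chars.isspace c = false) (h : List Char) :
    PySem.Chars.strip (c :: h) = c :: PySem.Chars.rstrip h := by
  unfold PySem.Chars.strip PySem.Chars.lstrip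
  rw [List.dropWhile_cons, if_neg (by simp [hc])]
  exact pv_rstrip_append_cons c hc [] h

-- ---------- bridging pvF to the List-Char strip ----------

theorem pv_strip_ofList (x : List Char) :
    PySem.Str.strip (String.ofList x) = String.ofList (PySem.Chars.strip x) := by
  apply String.ext
  simp [PySem.Str.toList_strip]

theorem pv_ofList_ne_empty (x : List Char) : (String.ofList x ≠ "") ↔ x ≠ [] := by
  constructor
  · intro h hx; exact h (by simp [hx])
  · intro h hx
    apply h
    have := congrArg String.toList hx
    simpa using this

-- pvF with the Chars-level strip
def pvG (parts : List (List Char)) : List String :=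
  (parts.map (fun x => String.ofList (PySem.Chars.strip x))).filter (fun t => t ≠ "")

theorem pv_strip_nil : PySem.Chars.strip [] = [] := rfl

theorem pvF_eq_pvG (parts : List (List Char)) : pvF parts = pvG parts := by
  unfold pvF pvG
  rw [List.map_map]
  rw [show (PySem.Str.strip ∘ String.ofList) = fun x => String.ofList (PySem.Chars.strip x)
    from funext pv_strip_ofList]

theorem pvG_cons (h : List Char) (tl : List (List Char)) :
    pvG (h :: tl)
      = (if PySem.Chars.strip h = [] then [] else [String.ofList (PySem.Chars.strip h)])
        ++ pvG tl := by
  unfold pvG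
  by_cases hs : PySem.Chars.strip h = []
  · simp [hs, List.filter_cons]
  · rw [List.map_cons, List.filter_cons, if_pos (by simpa using (pv_ofList_ne_empty _).mpr hs)]
    simp [hs]

-- ---------- the scanner (B's inner loop) ----------

theorem pv_scan_spec (l : List Char) (values : List String) (buf pending : List Char)
    (hd : l.all pvDomChar = true)
    (hp : ∀ c ∈ pending, PySem.Chars.isspace c = true)
    (hbp : buf = [] → pending = []) :
    (if (l.foldl pvScanStep (values, buf, pending)).2.1 ≠ []
     then (l.foldl pvScanStep (values, buf, pending)).1
            ++ [String.ofList (l.foldl pvScanStep (values, buf, pending)).2.1]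
     else (l.foldl pvScanStep (values, buf, pending)).1)
    = values ++
      (if buf = [] then pvG (List.splitOn ',' l)
       else [String.ofList (buf ++ PySem.Chars.rstrip (pending ++ (List.splitOn ',' l).headI))]
            ++ pvG (List.splitOn ',' l).tail) := by
  induction l generalizing values buf pending with
  | nil =>
    by_cases hb : buf = []
    · subst hb
      simp [List.splitOn, List.splitOnP, List.splitOnP.go, pvG, pv_strip_nil]
    · rw [if_neg hb]
      have hpe : PySem.Chars.rstrip (pending ++ ([[]] : List (List Char)).headI) = [] := by
        simp only [List.headI, List.append_nil]
        exact pv_rstrip_ws pending hp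
      simp only [List.foldl_nil, if_pos hb]
      rw [show List.splitOn ',' ([] : List Char) = [[]] from rfl]
      rw [hpe]
      simp [pvG]
  | cons c t ih =>
    have hdc : pvDomChar c = true := by
      simp only [List.all_cons, Bool.and_eq_true] at hd; exact hd.1
    have hdt : t.all pvDomChar = true := by
      simp only [List.all_cons, Bool.and_eq_true] at hd; exact hd.2
    rw [List.foldl_cons]
    by_cases hc : c = ','
    · subst hc
      have hstep : pvScanStep (values, buf, pending) ','
          = ((if buf ≠ [] then values ++ [String.ofList buf] else values), [], []) := by
        simp [pvScanStep]
      rw [hstep, ih _ _ _ hdt (by intro c hc; cases hc) (fun _ => rfl)]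
      rw [show List.splitOn ',' (',' :: t) = [] :: List.splitOn ',' t by
        simp [List.splitOn, List.splitOnP_cons]]
      by_cases hb : buf = []
      · subst hb
        simp only [ne_eq, not_true_eq_false, if_neg, if_pos rfl]
        rw [pvG_cons]
        simp [pv_strip_nil]
      · rw [if_neg hb]
        simp only [ne_eq, hb, not_false_eq_true, if_pos, List.headI, List.tail]
        rw [List.append_nil, pv_rstrip_ws pending hp]
        simp
    · by_cases hw : c = ' ' ∨ c = '\t' ∨ c = '\r' ∨ c = '\n'
      · have hstep : pvScanStep (values, buf, pending) c
            = (values, buf, if buf ≠ [] then pending ++ [c] else pending) := by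
          simp only [pvScanStep, if_neg hc, if_pos hw]
        rw [hstep]
        have hsplit : List.splitOn ',' (c :: t)
            = List.modifyHead (List.cons c) (List.splitOn ',' t) := by
          simp only [List.splitOn, List.splitOnP_cons]
          rw [if_neg (by simp [hc])]
        obtain ⟨h0, tl0, he⟩ :=
          List.exists_cons_of_ne_nil (List.splitOnP_ne_nil (· == ',') t)
        by_cases hb : buf = []
        · have hpe : pending = [] := hbp hb
          subst hb hpe
          simp only [ne_eq, not_true_eq_false, if_neg, if_false]
          rw [ih _ _ _ hdt (by intro c hc; cases hc) (fun _ => rfl)]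
          simp only [if_true]
          rw [hsplit]
          rw [show List.splitOn ',' t = h0 :: tl0 from he]
          rw [List.modifyHead, pvG_cons, pvG_cons,
            pv_strip_cons_ws c (pv_ws_isspace c hw)]
        · rw [if_pos hb]
          have hp' : ∀ x ∈ pending ++ [c], PySem.Chars.isspace x = true := by
            intro x hx
            rcases List.mem_append.mp hx with hx | hx
            · exact hp x hx
            · rcases List.mem_singleton.mp hx with rfl
              exact pv_ws_isspace x hw
          rw [ih _ _ _ hdt hp' (fun h => absurd h hb)]
          rw [if_neg hb, if_neg hb, hsplit]
          rw [show List.splitOn ',' t = h0 :: tl0 from he]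
          simp only [List.modifyHead, List.headI, List.tail, List.append_assoc,
            List.cons_append, List.nil_append]
      · have hstep : pvScanStep (values, buf, pending) c
            = (values, buf ++ pending ++ [c], []) := by
          simp only [pvScanStep, if_neg hc, if_neg hw]
        rw [hstep]
        have hcs : PySem.Chars.isspace c = false := pv_not_ws_isspace c hdc hw
        have hb' : buf ++ pending ++ [c] ≠ [] := by simp
        rw [ih _ _ _ hdt (by intro x hx; cases hx) (fun h => absurd h hb')]
        rw [if_neg hb']
        have hsplit : List.splitOn ',' (c :: t)
            = List.modifyHead (List.cons c) (List.splitOn ',' t) := by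
          simp only [List.splitOn, List.splitOnP_cons]
          rw [if_neg (by simp [hc])]
        obtain ⟨h0, tl0, he⟩ :=
          List.exists_cons_of_ne_nil (List.splitOnP_ne_nil (· == ',') t)
        rw [hsplit, show List.splitOn ',' t = h0 :: tl0 from he]
        by_cases hb : buf = []
        · have hpe : pending = [] := hbp hb
          subst hb hpe
          simp only [if_true]
          rw [List.modifyHead, pvG_cons, pv_strip_cons_not_ws c hcs]
          simp only [List.nil_append, List.headI, List.tail]
          rw [if_neg (by simp)]
          simp
        · rw [if_neg hb]
          simp only [List.modifyHead, List.headI, List.tail]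
          rw [pv_rstrip_append_cons c hcs pending h0]
          simp [List.append_assoc]

-- B's whole loop, as the same flatMap of contributions
theorem pv_B_eq_flatMap (vals : List String) (acc : List String)
    (hd : vals.all pvDomStr = true) :
    vals.foldl (fun values raw =>
        let st := raw.toList.foldl pvScanStep (values, [], [])
        if st.2.1 ≠ [] then st.1 ++ [String.ofList st.2.1] else st.1) acc
      = acc ++ vals.flatMap pvContrib := by
  induction vals generalizing acc with
  | nil => simp
  | cons v vs ih =>
    simp only [List.all_cons, Bool.and_eq_true] at hd
    rw [List.foldl_cons]
    dsimp only
    rw [pv_scan_spec v.toList acc [] [] hd.1 (by intro c hc; cases hc) (fun _ => rfl)]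
    rw [if_pos rfl, ih _ hd.2]
    rw [show pvG (List.splitOn ',' v.toList) = pvContrib v from
      (by rw [pvContrib, pvF_eq_pvG])]
    simp [List.append_assoc]

-- the values under the key are strings of the query, hence inside the domain
theorem pv_got_dom (query : List (String × List String)) (key : String)
    (hd : Dom_query_values_py query key) :
    (((PySem.Dict.mk query).get? key).getD []).all pvDomStr = true := by
  unfold Dom_query_values_py at hd
  simp only [Bool.and_eq_true, List.all_eq_true] at hd
  cases hg : (PySem.Dict.mk query).get? key with
  | none => simp
  | some v =>
    have hv : (key, v) ∈ (PySem.Dict.mk query).items :=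
      PySem.Dict.mem_items_of_get?_eq_some _ hg
    have hv' : (key, v) ∈ query := hv
    have := hd.1 _ hv'
    simp only [Bool.and_eq_true, List.all_eq_true] at this
    simp only [Option.getD_some, List.all_eq_true]
    exact this.2

-- ===== VERDICT (by name: the statement is the Claim_ definition above) =====
theorem query_values_py_spec : Claim_equal_query_values_py := by
  intro query key hd
  show query_values_py query key = query_values_py_alt query key
  unfold query_values_py query_values_py_alt
  dsimp only
  rw [show (PySem.Dict.mk query).getD key [] = ((PySem.Dict.mk query).get? key).getD [] from rfl]
  set got := ((PySem.Dict.mk query).get? key).getD [] with hgot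
  have hall : ((if got = [] then [] else got)).all pvDomStr = true := by
    split
    · rfl
    · exact pv_got_dom query key hd
  rw [pv_A_eq_flatMap, pv_B_eq_flatMap _ _ hall]
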